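-- pv_equiv track=rewrite | github.com/autoppia/autoppia_iwa | autoppia_iwa/src/demo_webs/projects/p14_autohealth/data_utils.py | transform_appointments_to_modified
-- ===== SOURCE A (Python) =====
-- def transform_appointments_to_modified(appointments: list[dict]) -> list[dict]:
--     """Transform appointments from backend format (camelCase) to MODIFIED format (snake_case)."""
--     modified = []
--     for appt in appointments:
--         new_appt = appt.copy()
--         if "doctorName" in new_appt:
--             new_appt["doctor_name"] = new_appt.pop("doctorName")
--         if "specialty" in new_appt:
--             new_appt["speciality"] = new_appt.pop("specialty")
--         modified.append(new_appt)
--     return modified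
-- ===== SOURCE B (Python) =====
-- _RENAMES = (("doctorName", "doctor_name"), ("specialty", "speciality"))
--
--
-- def _rename_key(appointments, old, new):
--     """One whole-list pass renaming `old` to `new` in every appointment (renamed key goes to the end)."""
--     renamed = []
--     for appt in appointments:
--         kept = {k: v for k, v in appt.items() if k != old}
--         if old in appt:
--             kept[new] = appt[old]
--         renamed.append(kept)
--     return renamed
--
--
-- def transform_appointments_to_modified(appointments: list[dict]) -> list[dict]:
--     """Transform appointments from backend format (camelCase) to MODIFIED format (snake_case)."""
--     result = appointments
--     for old, new in _RENAMES:
--         result = _rename_key(result, old, new)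
--     return result
-- ===== Notes on version B (the rewrite author's own statement) =====
-- stated objective: alternative
-- what changed: A makes one loop over the appointments doing two hard-coded check-and-pop renames inside each dict copy; B instead runs a generic single-key rename helper as two staged whole-list passes driven by a rename table, each pass rebuilding every appointment with the one key filtered out and re-added under its new name.
import Mathlib
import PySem

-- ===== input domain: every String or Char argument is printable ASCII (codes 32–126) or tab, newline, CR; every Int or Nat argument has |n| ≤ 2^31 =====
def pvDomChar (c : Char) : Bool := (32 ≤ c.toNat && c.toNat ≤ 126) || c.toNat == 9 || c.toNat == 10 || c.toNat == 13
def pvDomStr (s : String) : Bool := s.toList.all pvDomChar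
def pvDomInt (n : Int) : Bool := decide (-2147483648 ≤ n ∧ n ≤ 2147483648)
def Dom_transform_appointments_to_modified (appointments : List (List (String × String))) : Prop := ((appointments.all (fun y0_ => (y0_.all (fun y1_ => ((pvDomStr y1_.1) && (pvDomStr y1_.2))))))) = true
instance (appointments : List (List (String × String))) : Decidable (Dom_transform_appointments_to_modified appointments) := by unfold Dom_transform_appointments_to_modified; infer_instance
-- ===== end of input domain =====

-- B restructures A's single loop with two per-item conditional pops into two staged
-- whole-list passes of a generic single-key rename helper driven by a rename table;
-- objective: alternative decomposition, same cost.

-- ===== PORT A =====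
def stepKey (ko kn : String) (d : PySem.Dict String String) : PySem.Dict String String :=
  if d.contains ko then                               -- if ko in new_appt:
    match d.pop? ko with                              --   new_appt[kn] = new_appt.pop(ko)
    | some (v, d') => d'.insert kn v
    | none => d
  else d

def transform_appointments_to_modified (appointments : List (List (String × String))) : List (List (String × String)) :=
  appointments.foldl (fun modified appt =>
    let new_appt := PySem.Dict.ofList appt            -- new_appt = appt.copy()
    let new_appt := stepKey "doctorName" "doctor_name" new_appt
    let new_appt := stepKey "specialty" "speciality" new_appt
    modified ++ [new_appt.items]) []                  -- modified.append(new_appt)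

-- ===== PORT B =====
-- _RENAMES = (("doctorName", "doctor_name"), ("specialty", "speciality"))
def pvRenames : List (String × String) := [("doctorName", "doctor_name"), ("specialty", "speciality")]

-- def _rename_key(appointments, old, new): one whole-list pass renaming `old` to `new`
def renameKeyPass (appointments : List (List (String × String))) (old new_ : String) : List (List (String × String)) :=
  appointments.foldl (fun renamed appt =>
    let d := PySem.Dict.ofList appt
    -- kept = {k: v for k, v in appt.items() if k != old}
    let kept := PySem.Dict.ofList (d.items.filter (fun p => !(p.1 == old)))
    -- if old in appt: kept[new] = appt[old]
    let kept :=
      if d.contains old then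
        match d.get? old with
        | some v => kept.insert new_ v
        | none => kept
      else kept
    renamed ++ [kept.items]) []                       -- renamed.append(kept)

def transform_appointments_to_modified_alt (appointments : List (List (String × String))) : List (List (String × String)) :=
  pvRenames.foldl (fun result kv => renameKeyPass result kv.1 kv.2) appointments

-- ===== PRECONDITION & SPEC =====
def Spec_transform_appointments_to_modified (appointments : List (List (String × String))) (out : List (List (String × String))) : Prop := out = transform_appointments_to_modified_alt appointments
instance (appointments : List (List (String × String))) (out : List (List (String × String))) : Decidable (Spec_transform_appointments_to_modified appointments out) := by unfold Spec_transform_appointments_to_modified; infer_instance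

-- ===== CLAIM (what is proved, stated in full; the proofs are below) =====
def Claim_equal_transform_appointments_to_modified : Prop := ∀ (appointments : List (List (String × String))), Dom_transform_appointments_to_modified appointments → Spec_transform_appointments_to_modified appointments (transform_appointments_to_modified appointments)

-- ===== LEMMAS AND PROOFS =====

-- `insOpt o k d` inserts (k, v) if o = some v; the common normal form of both per-item bodies.
def insOpt (o : Option String) (k : String) (d : PySem.Dict String String) : PySem.Dict String String :=
  match o with
  | some v => d.insert k v
  | none => d

theorem erase_of_not_contains (d : PySem.Dict String String) (k : String)
    (h : d.contains k = false) : d.erase k = d := by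
  apply PySem.Dict.ext
  simp only [PySem.Dict.erase, PySem.Dict.contains, List.any_eq_false] at *
  exact List.filter_eq_self.2 (fun p hp => by simpa using h p hp)

theorem step_eq (d : PySem.Dict String String) (ko kn : String) :
    stepKey ko kn d = insOpt (d.get? ko) kn (d.erase ko) := by
  unfold stepKey
  rw [PySem.Dict.contains_eq_isSome_get?]
  cases hg : d.get? ko with
  | none =>
    simp [insOpt, erase_of_not_contains d ko
      (by rw [PySem.Dict.contains_eq_isSome_get?, hg]; rfl)]
  | some v => simp [insOpt, PySem.Dict.pop?, hg]

-- a fold of inserts over pairs with fresh, distinct keys appends them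
theorem update_fresh (l : List (String × String)) : ∀ d : PySem.Dict String String,
    (l.map Prod.fst).Nodup → (∀ p ∈ l, d.contains p.1 = false) →
    d.update l = PySem.Dict.mk (d.items ++ l) := by
  induction l with
  | nil => intro d _ _; simp [PySem.Dict.update]
  | cons p t ih =>
    intro d hnd hf
    have hp : d.contains p.1 = false := hf p (by simp)
    have hins : d.insert p.1 p.2 = PySem.Dict.mk (d.items ++ [p]) := by
      apply PySem.Dict.ext; simp [PySem.Dict.insert, hp]
    have hu : d.update (p :: t) = (d.insert p.1 p.2).update t := by
      simp [PySem.Dict.update]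
    rw [hu, hins, ih _ (by simpa using hnd.of_cons) ?_]
    · simp
    · intro q hq
      have hpq : ¬ p.1 = q.1 := by
        simp only [List.map_cons, List.nodup_cons] at hnd
        intro he; exact hnd.1 (he ▸ List.mem_map_of_mem hq)
      have hqd : d.contains q.1 = false := hf q (by simp [hq])
      simp only [PySem.Dict.contains] at *
      simp [List.any_append, hqd, hpq]

theorem ofList_eq_mk (l : List (String × String)) (h : (l.map Prod.fst).Nodup) :
    PySem.Dict.ofList l = PySem.Dict.mk l := by
  rw [PySem.Dict.ofList, update_fresh l PySem.Dict.empty h (fun p _ => rfl)]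
  rfl

theorem ofList_items (d : PySem.Dict String String) (h : (d.items.map Prod.fst).Nodup) :
    PySem.Dict.ofList d.items = d := by
  rw [ofList_eq_mk _ h]

theorem mk_filter_eq_erase (d : PySem.Dict String String) (k : String) :
    PySem.Dict.mk (d.items.filter (fun p => !(p.1 == k))) = d.erase k := by
  apply PySem.Dict.ext
  simp [PySem.Dict.erase]

theorem nodup_keys_filter (l : List (String × String)) (q : String × String → Bool)
    (h : (l.map Prod.fst).Nodup) : ((l.filter q).map Prod.fst).Nodup :=
  h.sublist ((l.filter_sublist).map Prod.fst)

theorem nodup_keys_insOpt (d : PySem.Dict String String) (o : Option String) (k : String)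
    (h : (d.items.map Prod.fst).Nodup) : ((insOpt o k d).items.map Prod.fst).Nodup := by
  cases o with
  | none => exact h
  | some v => exact PySem.Dict.nodup_keys_insert d k v h

theorem nodup_keys_step (d : PySem.Dict String String) (ko kn : String)
    (h : (d.items.map Prod.fst).Nodup) : ((stepKey ko kn d).items.map Prod.fst).Nodup := by
  rw [step_eq]
  exact nodup_keys_insOpt _ _ _ (by rw [← mk_filter_eq_erase]; exact nodup_keys_filter _ _ h)

-- one pass of B's helper on one appointment computes A's per-key step
theorem pass_body (old new_ : String) (d : PySem.Dict String String)
    (h : (d.items.map Prod.fst).Nodup) :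
    (let kept := PySem.Dict.ofList (d.items.filter (fun p => !(p.1 == old)))
     let kept :=
       if d.contains old then
         match d.get? old with
         | some v => kept.insert new_ v
         | none => kept
       else kept
     kept) = stepKey old new_ d := by
  have hk : PySem.Dict.ofList (d.items.filter (fun p => !(p.1 == old))) = d.erase old := by
    rw [ofList_eq_mk _ (nodup_keys_filter _ _ h), mk_filter_eq_erase]
  rw [step_eq, hk]
  rw [PySem.Dict.contains_eq_isSome_get?]
  cases hg : d.get? old <;> simp [insOpt]

-- the per-appointment function of renameKeyPass
def passFn (old new_ : String) (appt : List (String × String)) : List (String × String) :=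
  (let d := PySem.Dict.ofList appt
   let kept := PySem.Dict.ofList (d.items.filter (fun p => !(p.1 == old)))
   let kept :=
     if d.contains old then
       match d.get? old with
       | some v => kept.insert new_ v
       | none => kept
     else kept
   kept).items

theorem renameKeyPass_eq_map (l : List (List (String × String))) (old new_ : String) :
    renameKeyPass l old new_ = l.map (passFn old new_) := by
  unfold renameKeyPass passFn
  simpa using PySem.List.foldl_append_singleton_eq_map _ l []

theorem passFn_eq (old new_ : String) (appt : List (String × String)) :
    passFn old new_ appt = (stepKey old new_ (PySem.Dict.ofList appt)).items := by
  unfold passFn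
  rw [pass_body old new_ _ (PySem.Dict.nodup_keys_ofList appt)]

-- ===== VERDICT (by name: the statement is the Claim_ definition above) =====
theorem transform_appointments_to_modified_spec : Claim_equal_transform_appointments_to_modified := by
  intro appointments _
  unfold Spec_transform_appointments_to_modified transform_appointments_to_modified
    transform_appointments_to_modified_alt pvRenames
  simp only [List.foldl_cons, List.foldl_nil, renameKeyPass_eq_map, List.map_map]
  rw [PySem.List.foldl_append_singleton_eq_map]
  apply List.map_congr_left
  intro appt _
  simp only [Function.comp]
  rw [passFn_eq, passFn_eq,
      ofList_items _ (nodup_keys_step _ _ _ (PySem.Dict.nodup_keys_ofList appt))]
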